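-- pv_equiv track=rewrite | github.com/saevaexe/kinna | AppStore/build_composites.py | parse_segments
-- ===== SOURCE A (Python) =====
-- def parse_segments(line: str) -> list[tuple[str, bool]]:
--     parts: list[tuple[str, bool]] = []
--     current = []
--     emphasis = False
--     for char in line:
--         if char == "*":
--             if current:
--                 parts.append(("".join(current), emphasis))
--                 current = []
--             emphasis = not emphasis
--             continue
--         current.append(char)
--     if current:
--         parts.append(("".join(current), emphasis))
--     return parts
-- ===== SOURCE B (Python) =====
-- def parse_segments(line: str) -> list[tuple[str, bool]]:
--     return [(part, i % 2 == 1) for i, part in enumerate(line.split("*")) if part]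
-- ===== Notes on version B (the rewrite author's own statement) =====
-- stated objective: idiomatic
-- what changed: Replaces the per-character loop with a toggled emphasis flag and a manually joined accumulator by a single str.split on the asterisk plus an enumerate comprehension that keeps non-empty parts and derives emphasis from index parity.
import Mathlib
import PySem

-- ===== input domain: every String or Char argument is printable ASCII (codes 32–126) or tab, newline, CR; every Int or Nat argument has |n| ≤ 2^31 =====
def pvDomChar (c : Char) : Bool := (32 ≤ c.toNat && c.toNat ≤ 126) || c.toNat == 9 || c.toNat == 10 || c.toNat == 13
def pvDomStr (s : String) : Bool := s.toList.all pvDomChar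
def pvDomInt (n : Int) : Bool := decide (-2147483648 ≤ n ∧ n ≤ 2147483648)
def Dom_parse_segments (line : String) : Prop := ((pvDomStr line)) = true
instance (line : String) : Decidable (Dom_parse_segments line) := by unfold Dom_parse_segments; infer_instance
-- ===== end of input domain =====

-- B replaces A's per-character loop (toggling an emphasis flag, joining an accumulator)
-- by split-on-'*' plus an enumerate comprehension deriving emphasis from index parity (idiomatic).


-- ===== PORT A =====
def parse_segments (line : String) : List (String × Bool) :=
  let st := line.toList.foldl
    (fun (st : List (String × Bool) × List Char × Bool) c =>
      if c = '*' then
        ((if st.2.1 ≠ [] then st.1 ++ [(String.ofList st.2.1, st.2.2)] else st.1), [], !st.2.2)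
      else
        (st.1, st.2.1 ++ [c], st.2.2))
    ([], [], false)
  if st.2.1 ≠ [] then st.1 ++ [(String.ofList st.2.1, st.2.2)] else st.1

-- ===== PORT B =====
def parse_segments_alt (line : String) : List (String × Bool) :=
  let parts := (PySem.Chars.splitOn line.toList ['*']).map String.ofList
  (PySem.List.enumerate parts).filterMap
    (fun ip => if ip.2 ≠ "" then some (ip.2, PySem.Int.mod ip.1 2 == 1) else none)

-- ===== PRECONDITION & SPEC =====
def Spec_parse_segments (line : String) (out : List (String × Bool)) : Prop := out = parse_segments_alt line
instance (line : String) (out : List (String × Bool)) : Decidable (Spec_parse_segments line out) := by unfold Spec_parse_segments; infer_instance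

-- ===== CLAIM (what is proved, stated in full; the proofs are below) =====
def Claim_equal_parse_segments : Prop := ∀ (line : String), Dom_parse_segments line → Spec_parse_segments line (parse_segments line)

-- ===== LEMMAS AND PROOFS =====

-- simple recursive characterization of splitting on '*' (cur kept in order)
def pvSplit (cs cur : List Char) : List (List Char) :=
  match cs with
  | [] => [cur]
  | c :: r => if c = '*' then cur :: pvSplit r [] else pvSplit r (cur ++ [c])

-- alternating-emphasis rendering of a list of raw segments
def pvRender (ps : List (List Char)) (e : Bool) : List (String × Bool) :=
  match ps with
  | [] => []
  | p :: rest => (if p ≠ [] then [(String.ofList p, e)] else []) ++ pvRender rest (!e)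

theorem pvSplitOn_go_eq (cs : List Char) : ∀ (fuel : Nat) (cur : List Char)
    (acc : List (List Char)), cs.length < fuel →
    PySem.Chars.splitOn.go ['*'] fuel cs cur acc = acc.reverse ++ pvSplit cs cur.reverse := by
  induction cs with
  | nil =>
    intro fuel cur acc h
    rcases Nat.exists_eq_succ_of_ne_zero (by omega : fuel ≠ 0) with ⟨f, rfl⟩
    rw [PySem.Chars.splitOn.go]
    simp [pvSplit]
    omega
  | cons c r ih =>
    intro fuel cur acc h
    rcases Nat.exists_eq_succ_of_ne_zero (by omega : fuel ≠ 0) with ⟨f, rfl⟩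
    rw [PySem.Chars.splitOn.go]
    by_cases hc : c = '*'
    · subst hc
      rw [if_pos (by simp [List.isPrefixOf]),
          show List.drop (['*'] : List Char).length ('*' :: r) = r from rfl,
          ih f [] (cur.reverse :: acc) (by simpa using h)]
      simp [pvSplit]
    · rw [if_neg (by simp [List.isPrefixOf]; exact fun h' => absurd h'.symm hc),
          ih f (c :: cur) acc (by simpa using h)]
      simp [pvSplit, hc]

theorem pvSplitOn_eq (cs : List Char) :
    PySem.Chars.splitOn cs ['*'] = pvSplit cs [] := by
  unfold PySem.Chars.splitOn
  rw [pvSplitOn_go_eq cs (cs.length + 1) [] [] (by omega)]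
  simp

theorem pvParity (s : Int) : (PySem.Int.mod (s + 1) 2 == 1) = !(PySem.Int.mod s 2 == 1) := by
  have h1 : PySem.Int.mod s 2 = s % 2 := PySem.Int.mod_eq_emod_of_pos (by omega)
  have h2 : PySem.Int.mod (s + 1) 2 = (s + 1) % 2 := PySem.Int.mod_eq_emod_of_pos (by omega)
  rw [h1, h2]
  rcases Int.emod_two_eq s with h | h
  · have : (s + 1) % 2 = 1 := by omega
    simp [h, this]
  · have : (s + 1) % 2 = 0 := by omega
    simp [h, this]

theorem pvAlt_eq_render (ps : List (List Char)) : ∀ (s : Int),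
    (PySem.List.enumerate (ps.map String.ofList) s).filterMap
      (fun ip => if ip.2 ≠ "" then some (ip.2, PySem.Int.mod ip.1 2 == 1) else none)
    = pvRender ps (PySem.Int.mod s 2 == 1) := by
  induction ps with
  | nil => intro s; simp [pvRender]
  | cons p rest ih =>
    intro s
    rw [List.map_cons, PySem.List.enumerate_cons]
    by_cases hp : p = []
    · subst hp
      rw [List.filterMap_cons_none (by rw [if_neg]; simp),
          ih (s + 1), pvParity]
      simp [pvRender]
    · rw [List.filterMap_cons_some (by rw [if_pos]; simp [hp]),
          ih (s + 1), pvParity]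
      simp [pvRender, hp]

theorem pvLoopA_eq (cs : List Char) : ∀ (parts : List (String × Bool)) (cur : List Char)
    (e : Bool),
    (let st := cs.foldl
        (fun (st : List (String × Bool) × List Char × Bool) c =>
          if c = '*' then
            ((if st.2.1 ≠ [] then st.1 ++ [(String.ofList st.2.1, st.2.2)] else st.1), [], !st.2.2)
          else
            (st.1, st.2.1 ++ [c], st.2.2))
        (parts, cur, e)
      if st.2.1 ≠ [] then st.1 ++ [(String.ofList st.2.1, st.2.2)] else st.1)
    = parts ++ pvRender (pvSplit cs cur) e := by
  induction cs with
  | nil =>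
    intro parts cur e
    simp only [List.foldl, pvSplit, pvRender]
    by_cases hc : cur = [] <;> simp [hc]
  | cons c r ih =>
    intro parts cur e
    by_cases hc : c = '*'
    · subst hc
      simp only [List.foldl, if_pos]
      rw [ih]
      by_cases hcur : cur = [] <;> simp [pvSplit, pvRender, hcur]
    · simp only [List.foldl, if_neg hc]
      rw [ih]
      simp [pvSplit, hc]

-- ===== VERDICT (by name: the statement is the Claim_ definition above) =====
theorem parse_segments_spec : Claim_equal_parse_segments := by
  intro line _
  unfold Spec_parse_segments parse_segments parse_segments_alt
  rw [pvSplitOn_eq, pvAlt_eq_render (pvSplit line.toList []) 0]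
  have := pvLoopA_eq line.toList [] [] false
  simp only at this ⊢
  rw [this]
  simp
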